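-- pv_equiv track=rewrite | github.com/jcraig949jfi/Prometheus | cartography/v2/entropy_gradient_rays.py | trace_ray
-- ===== SOURCE A (Python) =====
-- GRID_SIZE = 200
--
-- def trace_ray(a, b, c, d, max_t=500):
--     """
--     Ray: (x(t), y(t)) = (a*t + b, c*t^2 + d) for t = 0, 1, 2, ...
--     Collect grid cells visited (clipped to [0, 199]).
--     Returns list of (row, col) tuples that lie on-grid (no duplicates in sequence).
--     """
--     visited = []
--     last = None
--     for t in range(max_t):
--         col = int(round(a * t + b))
--         row = int(round(c * t * t + d))
--         if 0 <= row < GRID_SIZE and 0 <= col < GRID_SIZE: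
--             cell = (row, col)
--             if cell != last:
--                 visited.append(cell)
--                 last = cell
--     return visited
-- ===== SOURCE B (Python) =====
-- GRID_SIZE = 200
--
-- def trace_ray(a, b, c, d, max_t=500):
--     # Divide-and-conquer: deduped on-grid cells for t in [lo, hi), merging halves
--     # by dropping the right half's head if it equals the left half's last cell.
--     def solve(lo, hi):
--         if hi - lo <= 0:
--             return []
--         if hi - lo == 1:
--             col = int(round(a * lo + b))
--             row = int(round(c * lo * lo + d))
--             if 0 <= row < GRID_SIZE and 0 <= col < GRID_SIZE:
--                 return [(row, col)]
--             return []
--         mid = lo + (hi - lo) // 2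
--         left = solve(lo, mid)
--         right = solve(mid, hi)
--         if left and right and right[0] == left[-1]:
--             return left + right[1:]
--         return left + right
--     return solve(0, max_t)
-- ===== Notes on version B (the rewrite author's own statement) =====
-- stated objective: alternative
-- what changed: Replaces A's single sequential pass with a last-cell sentinel by a recursive divide-and-conquer over the t-range: each half is solved independently and the two deduplicated halves are merged by dropping the right half's head when it equals the left half's last cell (correct because dedup of a concatenation only interacts at the boundary).
import Mathlib
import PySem

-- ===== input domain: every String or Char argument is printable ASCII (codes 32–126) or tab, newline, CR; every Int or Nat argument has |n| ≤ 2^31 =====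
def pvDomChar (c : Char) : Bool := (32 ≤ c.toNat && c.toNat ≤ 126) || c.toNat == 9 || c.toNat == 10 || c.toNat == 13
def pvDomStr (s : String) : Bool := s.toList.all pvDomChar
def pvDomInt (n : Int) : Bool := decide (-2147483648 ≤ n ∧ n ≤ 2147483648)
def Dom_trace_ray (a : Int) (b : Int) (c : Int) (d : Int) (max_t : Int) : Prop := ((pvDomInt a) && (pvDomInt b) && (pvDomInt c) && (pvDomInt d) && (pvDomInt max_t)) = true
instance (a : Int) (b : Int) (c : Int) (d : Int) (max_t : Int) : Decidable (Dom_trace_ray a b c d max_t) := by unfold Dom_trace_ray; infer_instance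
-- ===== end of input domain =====

-- B replaces A's sequential loop with a sentinel by divide-and-conquer over the t-range,
-- merging the two deduplicated halves at their boundary; objective: alternative.
-- All arguments are ints, so Python's int(round(x)) is the identity; both ports omit it.

-- ===== PORT A =====
-- one loop over range(max_t), state = (visited, last)
def trace_ray (a : Int) (b : Int) (c : Int) (d : Int) (max_t : Int) : List (Int × Int) :=
  ((PySem.List.pyRange 0 max_t 1).foldl
    (fun (st : List (Int × Int) × Option (Int × Int)) t =>
      let col := a * t + b
      let row := c * t * t + d
      if 0 ≤ row ∧ row < 200 ∧ 0 ≤ col ∧ col < 200 then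
        let cell := (row, col)
        if some cell ≠ st.2 then (st.1 ++ [cell], some cell) else st
      else st)
    ([], none)).1

-- ===== PORT B =====
-- solve(lo, hi): deduped on-grid cells for t in [lo, hi); recursion splits the range at mid
def trace_ray_solve (a : Int) (b : Int) (c : Int) (d : Int) (lo hi : Int) : List (Int × Int) :=
  if hi - lo ≤ 0 then []
  else if hi - lo = 1 then
    let col := a * lo + b
    let row := c * lo * lo + d
    if 0 ≤ row ∧ row < 200 ∧ 0 ≤ col ∧ col < 200 then [(row, col)] else []
  else
    let mid := lo + PySem.Int.floordiv (hi - lo) 2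
    let left := trace_ray_solve a b c d lo mid
    let right := trace_ray_solve a b c d mid hi
    if left ≠ [] ∧ right ≠ [] ∧ right.head? = left.getLast? then left ++ right.tail
    else left ++ right
termination_by (hi - lo).toNat
decreasing_by
  · have h2 : 2 ≤ hi - lo := by omega
    have := PySem.Int.floordiv_eq_ediv_of_pos (a := hi - lo) (b := 2) (by norm_num)
    omega
  · have h2 : 2 ≤ hi - lo := by omega
    have := PySem.Int.floordiv_eq_ediv_of_pos (a := hi - lo) (b := 2) (by norm_num)
    omega

def trace_ray_alt (a : Int) (b : Int) (c : Int) (d : Int) (max_t : Int) : List (Int × Int) :=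
  trace_ray_solve a b c d 0 max_t

-- ===== PRECONDITION & SPEC =====
def Spec_trace_ray (a : Int) (b : Int) (c : Int) (d : Int) (max_t : Int) (out : List (Int × Int)) : Prop := out = trace_ray_alt a b c d max_t
instance (a : Int) (b : Int) (c : Int) (d : Int) (max_t : Int) (out : List (Int × Int)) : Decidable (Spec_trace_ray a b c d max_t out) := by unfold Spec_trace_ray; infer_instance

-- ===== CLAIM =====
def Claim_equal_trace_ray : Prop := ∀ (a : Int) (b : Int) (c : Int) (d : Int) (max_t : Int), Dom_trace_ray a b c d max_t → Spec_trace_ray a b c d max_t (trace_ray a b c d max_t)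

-- ===== LEMMAS AND PROOFS =====

-- the per-cell step of A's fold, after the on-grid test has fired
def pvStepC (st : List (Int × Int) × Option (Int × Int)) (cell : Int × Int) :
    List (Int × Int) × Option (Int × Int) :=
  if some cell ≠ st.2 then (st.1 ++ [cell], some cell) else st

def pvGridP (p : Int × Int) : Bool := decide (0 ≤ p.1 ∧ p.1 < 200 ∧ 0 ≤ p.2 ∧ p.2 < 200)

def pvCells (a b c d : Int) (ts : List Int) : List (Int × Int) :=
  (ts.map (fun t => (c * t * t + d, a * t + b))).filter pvGridP

-- A's fold over t equals a fold of pvStepC over the filtered cell list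
theorem pvFoldA_eq (a b c d : Int) (ts : List Int)
    (st : List (Int × Int) × Option (Int × Int)) :
    ts.foldl
      (fun (st : List (Int × Int) × Option (Int × Int)) t =>
        let col := a * t + b
        let row := c * t * t + d
        if 0 ≤ row ∧ row < 200 ∧ 0 ≤ col ∧ col < 200 then
          let cell := (row, col)
          if some cell ≠ st.2 then (st.1 ++ [cell], some cell) else st
        else st) st
    = (pvCells a b c d ts).foldl pvStepC st := by
  induction ts generalizing st with
  | nil => rfl
  | cons t ts ih =>
      simp only [pvCells, List.foldl_cons, List.map_cons, List.filter_cons]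
      by_cases h : 0 ≤ c * t * t + d ∧ c * t * t + d < 200 ∧ 0 ≤ a * t + b ∧ a * t + b < 200
      · have hg : pvGridP (c * t * t + d, a * t + b) = true := by
          simp [pvGridP]; tauto
        simp only [h, if_pos, hg, List.foldl_cons]
        rw [ih]
        rfl
      · have hg : pvGridP (c * t * t + d, a * t + b) = false := by
          simp only [pvGridP, decide_eq_false_iff_not]; exact h
        simp only [h, if_neg, hg, Bool.false_eq_true, not_false_iff]
        exact ih st

-- dedup-with-boundary: drop elements equal to the previous kept one (initially `last`)
def pvDedup (last : Option (Int × Int)) : List (Int × Int) → List (Int × Int)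
  | [] => []
  | x :: xs => if some x = last then pvDedup last xs else x :: pvDedup (some x) xs

theorem pvFoldC_eq (cs : List (Int × Int)) (acc : List (Int × Int)) (last : Option (Int × Int)) :
    (cs.foldl pvStepC (acc, last)).1 = acc ++ pvDedup last cs := by
  induction cs generalizing acc last with
  | nil => simp [pvDedup]
  | cons x xs ih =>
      simp only [List.foldl_cons, pvStepC, pvDedup]
      by_cases h : some x = last
      · simp [h, ih]
      · simp [h, ih, List.append_assoc]

-- the boundary state after deduplicating xs starting from l
def pvLastB (l : Option (Int × Int)) (xs : List (Int × Int)) : Option (Int × Int) :=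
  (xs.getLast?).or l

theorem pvLastB_cons (l : Option (Int × Int)) (x : Int × Int) (xs : List (Int × Int)) :
    pvLastB l (x :: xs) = pvLastB (some x) xs := by
  cases xs with
  | nil => simp [pvLastB]
  | cons y ys =>
      simp only [pvLastB, List.getLast?_cons_cons]
      cases hc : (y :: ys).getLast? with
      | none => simp at hc
      | some z => simp

theorem pvDedup_append (xs ys : List (Int × Int)) (l : Option (Int × Int)) :
    pvDedup l (xs ++ ys) = pvDedup l xs ++ pvDedup (pvLastB l xs) ys := by
  induction xs generalizing l with
  | nil => simp [pvDedup, pvLastB]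
  | cons x xs ih =>
      simp only [List.cons_append, pvDedup, pvLastB_cons]
      by_cases h : some x = l
      · simp only [if_pos h]
        rw [ih, ← h]
      · simp only [if_neg h, List.cons_append]
        rw [ih]

-- deduplicating with a boundary b = deduplicating freely, then dropping an equal head
theorem pvDedup_some (b : Int × Int) (ys : List (Int × Int)) :
    pvDedup (some b) ys =
      (match pvDedup none ys with
       | [] => []
       | r :: rs => if r = b then rs else r :: rs) := by
  cases ys with
  | nil => rfl
  | cons y ys =>
      simp only [pvDedup, reduceCtorEq, if_false]
      by_cases h : y = b
      · simp [h]
      · simp [h]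

theorem pvGetLast?_cons_dedup (b : Int × Int) (rest : List (Int × Int)) :
    (b :: pvDedup (some b) rest).getLast? = (b :: rest).getLast? := by
  induction rest generalizing b with
  | nil => rfl
  | cons y ys ih =>
      simp only [pvDedup]
      by_cases h : y = b
      · subst h
        rw [if_pos rfl, ih, List.getLast?_cons_cons]
      · rw [if_neg (by simp [h])]
        rw [List.getLast?_cons_cons (a := b)]
        exact ih y

theorem pvDedup_getLast? (xs : List (Int × Int)) :
    (pvDedup none xs).getLast? = xs.getLast? := by
  cases xs with
  | nil => rfl
  | cons x xs =>
      simp only [pvDedup, reduceCtorEq, if_false]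
      exact pvGetLast?_cons_dedup x xs

-- pvCells distributes over range concatenation
theorem pvCells_append (a b c d : Int) (ts us : List Int) :
    pvCells a b c d (ts ++ us) = pvCells a b c d ts ++ pvCells a b c d us := by
  simp [pvCells]

-- the boundary merge of two independently deduplicated halves
theorem pvMerge (xs ys : List (Int × Int)) :
    pvDedup none (xs ++ ys) =
      (if pvDedup none xs ≠ [] ∧ pvDedup none ys ≠ [] ∧
          (pvDedup none ys).head? = (pvDedup none xs).getLast?
       then pvDedup none xs ++ (pvDedup none ys).tail
       else pvDedup none xs ++ pvDedup none ys) := by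
  rw [pvDedup_append]
  have hb : pvLastB none xs = (pvDedup none xs).getLast? := by
    rw [pvDedup_getLast?, pvLastB, Option.or_none]
  rw [hb]
  cases hL : pvDedup none xs with
  | nil => simp
  | cons l ls =>
      rw [List.getLast?_eq_some_getLast (h := by simp), pvDedup_some]
      cases hR : pvDedup none ys with
      | nil => simp
      | cons r rs =>
          by_cases he : r = (l :: ls).getLast (by simp)
          · simp [he]
          · simp [he]

-- the heart of the equivalence: solve(lo,hi) computes pvDedup none of the cells of [lo,hi)
theorem pvSolve_eq (a b c d : Int) :
    ∀ n (lo hi : Int), (hi - lo).toNat = n →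
      trace_ray_solve a b c d lo hi = pvDedup none (pvCells a b c d (PySem.List.pyRange lo hi 1)) := by
  intro n
  induction n using Nat.strong_induction_on with
  | _ n ih =>
    intro lo hi hn
    rw [trace_ray_solve]
    by_cases h0 : hi - lo ≤ 0
    · rw [if_pos h0, PySem.List.pyRange_one_eq_nil (by omega)]
      rfl
    · rw [if_neg h0]
      by_cases h1 : hi - lo = 1
      · rw [if_pos h1, PySem.List.pyRange_one_cons (by omega),
            PySem.List.pyRange_one_eq_nil (by omega)]
        by_cases hg : 0 ≤ c * lo * lo + d ∧ c * lo * lo + d < 200 ∧ 0 ≤ a * lo + b ∧ a * lo + b < 200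
        · rw [if_pos hg]
          simp only [pvCells, List.map_cons, List.map_nil, List.filter_cons, List.filter_nil]
          have : pvGridP (c * lo * lo + d, a * lo + b) = true := by simp [pvGridP]; tauto
          rw [this]
          simp [pvDedup]
        · rw [if_neg hg]
          simp only [pvCells, List.map_cons, List.map_nil, List.filter_cons, List.filter_nil]
          have : pvGridP (c * lo * lo + d, a * lo + b) = false := by
            simp only [pvGridP, decide_eq_false_iff_not]; exact hg
          rw [this]
          rfl
      · rw [if_neg h1]
        have h2 : 2 ≤ hi - lo := by omega
        have hfd : PySem.Int.floordiv (hi - lo) 2 = (hi - lo) / 2 :=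
          PySem.Int.floordiv_eq_ediv_of_pos (by norm_num)
        set mid := lo + PySem.Int.floordiv (hi - lo) 2 with hmid
        have hb : lo < mid ∧ mid < hi := by rw [hmid, hfd]; omega
        have hL := ih (mid - lo).toNat (by omega) lo mid rfl
        have hR := ih (hi - mid).toNat (by omega) mid hi rfl
        simp only [hL, hR]
        rw [PySem.List.pyRange_one_append lo mid hi (by omega) (by omega),
            pvCells_append, pvMerge]

-- ===== VERDICT =====
theorem trace_ray_spec : Claim_equal_trace_ray := by
  intro a b c d max_t _
  show trace_ray a b c d max_t = trace_ray_alt a b c d max_t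
  unfold trace_ray trace_ray_alt
  rw [pvFoldA_eq, pvFoldC_eq, pvSolve_eq a b c d (max_t - 0).toNat 0 max_t rfl]
  rfl
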